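-- pv_equiv track=rewrite | github.com/vgrichina/scorched-earth | disasm/dis.py | file_to_segoff
-- ===== SOURCE A (Python) =====
-- MZ_HEADER   = 0x6A00          # header size in bytes; code starts at file 0x6A00
--
-- MODULES = [
--     # (file_start, file_end, code_seg_paragraph, name)
--     (0x20EA0, 0x263F0, 0x1A4A, 'extras.cpp'),
--     (0x263F0, 0x2F830, 0x1F7F, 'icons.cpp'),
--     (0x2F830, 0x31FB0, 0x28B9, 'play.cpp'),
--     (0x31FB0, 0x33690, 0x2B3B, 'player.cpp'),
--     (0x33690, 0x38070, 0x2CBF, 'ranges.cpp'),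
--     (0x38070, 0x38780, 0x3167, 'shark.cpp'),
--     (0x38780, 0x3B8D0, 0x31D8, 'shields.cpp'),
--     (0x3B8D0, 0x4C290, 0x34ED, 'menu+dialogs'),
--     (0x4C290, 0x4D000, 0x4589, 'font module'),
-- ]
--
-- def file_to_segoff(file_off):
--     """Return (seg, off) for a file offset, using known module code segments."""
--     for start, end, seg, name in MODULES:
--         if start <= file_off < end:
--             off = (file_off - MZ_HEADER) - (seg * 16)
--             return seg, off
--     # Fallback: compute raw paragraph:offset
--     code_off = file_off - MZ_HEADER
--     if code_off >= 0:
--         return code_off >> 4, code_off & 0xF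
--     return 0, file_off
-- ===== SOURCE B (Python) =====
-- MZ_HEADER = 0x6A00
--
-- MODULES = [
--     (0x20EA0, 0x263F0, 0x1A4A, 'extras.cpp'),
--     (0x263F0, 0x2F830, 0x1F7F, 'icons.cpp'),
--     (0x2F830, 0x31FB0, 0x28B9, 'play.cpp'),
--     (0x31FB0, 0x33690, 0x2B3B, 'player.cpp'),
--     (0x33690, 0x38070, 0x2CBF, 'ranges.cpp'),
--     (0x38070, 0x38780, 0x3167, 'shark.cpp'),
--     (0x38780, 0x3B8D0, 0x31D8, 'shields.cpp'),
--     (0x3B8D0, 0x4C290, 0x34ED, 'menu+dialogs'),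
--     (0x4C290, 0x4D000, 0x4589, 'font module'),
-- ]
--
-- STARTS = [m[0] for m in MODULES]
--
-- def file_to_segoff(file_off):
--     """Return (seg, off) for a file offset, using known module code segments."""
--     # binary search for the rightmost module start <= file_off
--     lo, hi = 0, len(STARTS)
--     while lo < hi:
--         mid = (lo + hi) // 2
--         if STARTS[mid] <= file_off:
--             lo = mid + 1
--         else:
--             hi = mid
--     i = lo - 1
--     if i >= 0 and file_off < MODULES[i][1]:
--         seg = MODULES[i][2]
--         return seg, (file_off - MZ_HEADER) - seg * 16
--     code_off = file_off - MZ_HEADER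
--     if code_off >= 0:
--         return code_off >> 4, code_off & 0xF
--     return 0, file_off
-- ===== Notes on version B (the rewrite author's own statement) =====
-- stated objective: alternative
-- what changed: B replaces A's linear scan of the module table with a binary search over the sorted module start offsets (rightmost start <= file_off), then a single end-bound check; the fallback arithmetic is unchanged.
import Mathlib
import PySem

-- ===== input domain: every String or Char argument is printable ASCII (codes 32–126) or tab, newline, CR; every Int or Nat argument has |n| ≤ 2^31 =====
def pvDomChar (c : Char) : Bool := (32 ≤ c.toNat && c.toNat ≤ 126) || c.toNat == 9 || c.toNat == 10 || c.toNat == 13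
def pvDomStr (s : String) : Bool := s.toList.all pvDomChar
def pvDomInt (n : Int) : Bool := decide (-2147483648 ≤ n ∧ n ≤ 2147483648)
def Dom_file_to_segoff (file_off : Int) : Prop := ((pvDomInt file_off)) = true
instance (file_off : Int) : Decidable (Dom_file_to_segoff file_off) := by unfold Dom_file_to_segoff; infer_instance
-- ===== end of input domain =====

-- B replaces A's linear scan of the module table by a binary search over the
-- sorted module start offsets (objective: alternative; the module table is small,
-- so no speed claim is made).

-- ===== PORT A =====
def pvMZ_HEADER : Int := 0x6A00

def pvMODULES : List (Int × Int × Int × String) :=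
  [ (0x20EA0, 0x263F0, 0x1A4A, "extras.cpp"),
    (0x263F0, 0x2F830, 0x1F7F, "icons.cpp"),
    (0x2F830, 0x31FB0, 0x28B9, "play.cpp"),
    (0x31FB0, 0x33690, 0x2B3B, "player.cpp"),
    (0x33690, 0x38070, 0x2CBF, "ranges.cpp"),
    (0x38070, 0x38780, 0x3167, "shark.cpp"),
    (0x38780, 0x3B8D0, 0x31D8, "shields.cpp"),
    (0x3B8D0, 0x4C290, 0x34ED, "menu+dialogs"),
    (0x4C290, 0x4D000, 0x4589, "font module") ]

-- the 'for start, end, seg, name in MODULES' loop; on fall-through, the fallback after the loop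
def pvLoopA (f : Int) : List (Int × Int × Int × String) → Int × Int
  | [] =>
      let code_off := f - pvMZ_HEADER
      if code_off ≥ 0 then (code_off >>> 4, code_off.land 0xF)
      else (0, f)
  | (s, e, seg, _) :: rest =>
      if s ≤ f ∧ f < e then (seg, (f - pvMZ_HEADER) - seg * 16)
      else pvLoopA f rest

def file_to_segoff (file_off : Int) : Int × Int :=
  pvLoopA file_off pvMODULES

-- ===== PORT B =====
def pvSTARTS : List Int := pvMODULES.map (fun m => m.1)

-- the 'while lo < hi' binary-search loop of Source B
def pvBisect (f : Int) (lo hi : Nat) : Nat :=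
  if lo < hi then
    let mid := (lo + hi) / 2
    if pvSTARTS.getD mid 0 ≤ f then pvBisect f (mid + 1) hi
    else pvBisect f lo mid
  else lo
termination_by hi - lo
decreasing_by all_goals omega

def file_to_segoff_alt (file_off : Int) : Int × Int :=
  let lo := pvBisect file_off 0 pvSTARTS.length
  if 1 ≤ lo ∧ file_off < (pvMODULES.getD (lo - 1) (0,0,0,"")).2.1 then
    let seg := (pvMODULES.getD (lo - 1) (0,0,0,"")).2.2.1
    (seg, (file_off - pvMZ_HEADER) - seg * 16)
  else
    let code_off := file_off - pvMZ_HEADER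
    if code_off ≥ 0 then (code_off >>> 4, code_off.land 0xF)
    else (0, file_off)

-- ===== PRECONDITION & SPEC =====
def Spec_file_to_segoff (file_off : Int) (out : Int × Int) : Prop := out = file_to_segoff_alt file_off
instance (file_off : Int) (out : Int × Int) : Decidable (Spec_file_to_segoff file_off out) := by unfold Spec_file_to_segoff; infer_instance

-- ===== CLAIM (what is proved, stated in full; the proofs are below) =====
def Claim_equal_file_to_segoff : Prop := ∀ (file_off : Int), Dom_file_to_segoff file_off → Spec_file_to_segoff file_off (file_to_segoff file_off)

-- ===== LEMMAS AND PROOFS =====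

lemma pvBisect_refl (f : Int) (k : Nat) : pvBisect f k k = k := by
  rw [pvBisect]; simp

lemma pvBis_8_9 (f : Int) : pvBisect f 8 9 = (if (311952 : Int) ≤ f then 9 else 8) := by
  rw [pvBisect]
  norm_num [pvSTARTS, pvMODULES, List.getD, pvBisect_refl]
  try simp [pvBisect_refl]

lemma pvBis_5_6 (f : Int) : pvBisect f 5 6 = (if (229488 : Int) ≤ f then 6 else 5) := by
  rw [pvBisect]
  norm_num [pvSTARTS, pvMODULES, List.getD, pvBisect_refl]
  try simp [pvBisect_refl]

lemma pvBis_5_7 (f : Int) : pvBisect f 5 7 = (if (231296 : Int) ≤ f then 7 else (if (229488 : Int) ≤ f then 6 else 5)) := by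
  rw [pvBisect]
  norm_num [pvSTARTS, pvMODULES, List.getD, pvBisect_refl, pvBis_5_6]

lemma pvBis_5_9 (f : Int) : pvBisect f 5 9 = (if (243920 : Int) ≤ f then (if (311952 : Int) ≤ f then 9 else 8) else (if (231296 : Int) ≤ f then 7 else (if (229488 : Int) ≤ f then 6 else 5))) := by
  rw [pvBisect]
  norm_num [pvSTARTS, pvMODULES, List.getD, pvBis_8_9, pvBis_5_7]

lemma pvBis_3_4 (f : Int) : pvBisect f 3 4 = (if (204720 : Int) ≤ f then 4 else 3) := by
  rw [pvBisect]
  norm_num [pvSTARTS, pvMODULES, List.getD, pvBisect_refl]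
  try simp [pvBisect_refl]

lemma pvBis_0_1 (f : Int) : pvBisect f 0 1 = (if (134816 : Int) ≤ f then 1 else 0) := by
  rw [pvBisect]
  norm_num [pvSTARTS, pvMODULES, List.getD, pvBisect_refl]
  try simp [pvBisect_refl]

lemma pvBis_0_2 (f : Int) : pvBisect f 0 2 = (if (156656 : Int) ≤ f then 2 else (if (134816 : Int) ≤ f then 1 else 0)) := by
  rw [pvBisect]
  norm_num [pvSTARTS, pvMODULES, List.getD, pvBisect_refl, pvBis_0_1]

lemma pvBis_0_4 (f : Int) : pvBisect f 0 4 = (if (194608 : Int) ≤ f then (if (204720 : Int) ≤ f then 4 else 3) else (if (156656 : Int) ≤ f then 2 else (if (134816 : Int) ≤ f then 1 else 0))) := by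
  rw [pvBisect]
  norm_num [pvSTARTS, pvMODULES, List.getD, pvBis_3_4, pvBis_0_2]

lemma pvBis_0_9 (f : Int) : pvBisect f 0 9 = (if (210576 : Int) ≤ f then (if (243920 : Int) ≤ f then (if (311952 : Int) ≤ f then 9 else 8) else (if (231296 : Int) ≤ f then 7 else (if (229488 : Int) ≤ f then 6 else 5))) else (if (194608 : Int) ≤ f then (if (204720 : Int) ≤ f then 4 else 3) else (if (156656 : Int) ≤ f then 2 else (if (134816 : Int) ≤ f then 1 else 0)))) := by
  rw [pvBisect]
  norm_num [pvSTARTS, pvMODULES, List.getD, pvBis_5_9, pvBis_0_4]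


-- ===== VERDICT (by name: the statement is the Claim_ definition above) =====
set_option maxHeartbeats 2000000 in
theorem file_to_segoff_spec : Claim_equal_file_to_segoff := by
  intro f _
  unfold Spec_file_to_segoff file_to_segoff file_to_segoff_alt
  rw [show pvSTARTS.length = 9 from rfl, pvBis_0_9]
  norm_num [pvLoopA, pvMODULES, pvSTARTS, pvMZ_HEADER, List.getD]
  split_ifs <;> try rfl
  all_goals try norm_num [List.getD] at *
  all_goals omega
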